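-- pv_equiv track=rewrite | github.com/HansDanielsson/Python-Intro | Tentamen/251028/Task7.py | flatspecial
-- ===== SOURCE A (Python) =====
-- def flatspecial(lstlst):
--   if len(lstlst)==0:
--     return [0]
--
--   dela = lstlst[0]
--   delb = lstlst[1:]
--
--   if len(dela) == 0:
--     dela = [0]
--
--   return dela + flatspecial(delb)
-- ===== SOURCE B (Python) =====
-- def flatspecial(lstlst):
--     result = []
--     for sub in lstlst:
--         result.extend(sub if sub else [0])
--     result.append(0)
--     return result
-- ===== Notes on version B (the rewrite author's own statement) =====
-- stated objective: faster
-- what changed: Replaced the recursive head/tail decomposition with repeated list concatenation by a single iterative pass extending one accumulator (the base case's [0] becomes one final append), turning O(n^2) copying into O(n).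
import Mathlib
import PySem

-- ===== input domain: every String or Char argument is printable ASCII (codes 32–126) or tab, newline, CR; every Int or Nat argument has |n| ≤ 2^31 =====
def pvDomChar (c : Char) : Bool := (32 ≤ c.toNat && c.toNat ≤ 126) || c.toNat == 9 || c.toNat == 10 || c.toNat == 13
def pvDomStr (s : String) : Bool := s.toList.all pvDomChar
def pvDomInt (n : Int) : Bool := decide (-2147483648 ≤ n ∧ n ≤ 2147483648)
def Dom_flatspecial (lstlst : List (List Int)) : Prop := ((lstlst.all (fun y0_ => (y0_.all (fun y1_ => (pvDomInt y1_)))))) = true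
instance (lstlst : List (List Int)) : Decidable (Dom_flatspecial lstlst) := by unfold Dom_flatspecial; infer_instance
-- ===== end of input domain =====

-- B replaces A's O(n^2) recursive concatenation by one iterative accumulator pass (objective: simpler).


-- ===== PORT A =====
-- A: recursive; empty outer list -> [0]; empty head -> [0]; head ++ recurse on tail
def flatspecial : List (List Int) → List Int
  | [] => [0]
  | dela :: delb => (if dela.length = 0 then [0] else dela) ++ flatspecial delb

-- ===== PORT B =====
-- B: one iterative pass extending an accumulator, then the base case's trailing 0
def flatspecial_alt (lstlst : List (List Int)) : List Int :=
  (lstlst.foldl (fun result sub => result ++ (if sub = [] then [0] else sub)) []) ++ [0]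

-- ===== PRECONDITION & SPEC =====
def Spec_flatspecial (lstlst : List (List Int)) (out : List Int) : Prop := out = flatspecial_alt lstlst
instance (lstlst : List (List Int)) (out : List Int) : Decidable (Spec_flatspecial lstlst out) := by unfold Spec_flatspecial; infer_instance

-- ===== CLAIM (what is proved, stated in full; the proofs are below) =====
def Claim_equal_flatspecial : Prop := ∀ (lstlst : List (List Int)), Dom_flatspecial lstlst → Spec_flatspecial lstlst (flatspecial lstlst)

-- ===== LEMMAS AND PROOFS =====

-- ===== VERDICT (by name: the statement is the Claim_ definition above) =====
lemma flatspecial_foldl_shift (acc : List Int) (l : List (List Int)) :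
    l.foldl (fun result sub => result ++ (if sub = [] then [0] else sub)) acc
      = acc ++ l.foldl (fun result sub => result ++ (if sub = [] then [0] else sub)) [] := by
  induction l generalizing acc with
  | nil => simp
  | cons h t ih =>
    simp only [List.foldl_cons, List.nil_append]
    rw [ih, ih (if h = [] then [0] else h), List.append_assoc]

lemma flatspecial_eq_alt (lstlst : List (List Int)) :
    flatspecial lstlst = flatspecial_alt lstlst := by
  induction lstlst with
  | nil => simp [flatspecial, flatspecial_alt]
  | cons h t ih =>
    simp only [flatspecial, flatspecial_alt, List.foldl_cons, List.nil_append] at *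
    rw [flatspecial_foldl_shift, ih]
    by_cases hh : h = [] <;> simp [hh, List.length_eq_zero_iff]

theorem flatspecial_spec : Claim_equal_flatspecial :=
  fun lstlst _ => flatspecial_eq_alt lstlst
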